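-- pv_equiv track=rewrite | github.com/HAHAHAHA123456/MyUtils | LeTou_Blue_StaticFunc.py | staticLotteryNumber
-- ===== SOURCE A (Python) =====
-- def staticCounts_Continous_leaveOut(dataList, number):
--     idx = 0
--     countsNumber = 0
--     continousNumber = 0
--     leave_outNumber = 0
--     maxContinous = 0
--     maxLeaveNumber = 0
--     while idx < len(dataList):
--         if number in dataList[idx]:
--             countsNumber += 1
--             continousNumber += 1
--             leave_outNumber = 0
--             if continousNumber > maxContinous:
--                 maxContinous = continousNumber
--         else:
--             continousNumber = 0
--             leave_outNumber += 1
--             if leave_outNumber > maxLeaveNumber: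
--                 maxLeaveNumber = leave_outNumber
--         idx += 1
--     return countsNumber, maxContinous, maxLeaveNumber
--
-- def staticLotteryNumber(dataList):
--     staticInfo_dict = {}
--     for i in range(1, 13):
--         tempDict = {}
--         countsNumber, maxContinous, maxLeaveNumber = staticCounts_Continous_leaveOut(dataList=dataList, number=i)
--         tempDict['countsNumber'] = countsNumber
--         tempDict['maxContinous'] = maxContinous
--         tempDict['maxLeaveNumber'] = maxLeaveNumber
--         staticInfo_dict[str(i)] = tempDict
--     return staticInfo_dict
-- ===== SOURCE B (Python) =====
-- def staticLotteryNumber(dataList):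
--     n = len(dataList)
--     staticInfo_dict = {}
--     for number in range(1, 13):
--         positions = [i for i, row in enumerate(dataList) if number in row]
--         prev, cur, best, maxg = -1, 0, 0, 0
--         for p in positions:
--             cur = cur + 1 if p == prev + 1 else 1
--             if cur > best:
--                 best = cur
--             if p - prev - 1 > maxg:
--                 maxg = p - prev - 1
--             prev = p
--         if n - prev - 1 > maxg:
--             maxg = n - prev - 1
--         staticInfo_dict[str(number)] = {
--             'countsNumber': len(positions),
--             'maxContinous': best,
--             'maxLeaveNumber': maxg,
--         }
--     return staticInfo_dict
-- ===== Notes on version B (the rewrite author's own statement) =====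
-- stated objective: alternative
-- what changed: B first builds the list of draw indices where each number appears and derives count, max streak and max gap from consecutive-position differences in one scan of that index list, instead of A's row-by-row state machine with running streak/leave counters.
import Mathlib
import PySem

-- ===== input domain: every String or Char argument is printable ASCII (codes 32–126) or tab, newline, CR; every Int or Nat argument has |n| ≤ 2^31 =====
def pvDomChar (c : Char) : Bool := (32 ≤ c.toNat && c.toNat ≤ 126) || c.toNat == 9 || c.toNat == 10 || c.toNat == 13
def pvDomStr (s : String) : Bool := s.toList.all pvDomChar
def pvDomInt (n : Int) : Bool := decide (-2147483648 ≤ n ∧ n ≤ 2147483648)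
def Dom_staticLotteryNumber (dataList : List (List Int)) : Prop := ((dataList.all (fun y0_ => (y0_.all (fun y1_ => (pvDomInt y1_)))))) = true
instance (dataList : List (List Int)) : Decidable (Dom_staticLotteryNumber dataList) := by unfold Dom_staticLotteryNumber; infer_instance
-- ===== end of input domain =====

-- B derives each number's statistics from its list of occurrence positions (one scan of
-- consecutive-position differences) instead of A's per-row streak/leave state machine;
-- objective: alternative decomposition, same asymptotic cost.

-- ===== PORT A =====
-- state: (countsNumber, continousNumber, maxContinous, leave_outNumber, maxLeaveNumber)
def aStep (number : Int) (s : Int × Int × Int × Int × Int) (row : List Int) :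
    Int × Int × Int × Int × Int :=
  let (c, cs, ms, cg, mg) := s
  if row.contains number then
    let c := c + 1
    let cs := cs + 1
    let ms := if cs > ms then cs else ms
    (c, cs, ms, 0, mg)
  else
    let cg := cg + 1
    let mg := if cg > mg then cg else mg
    (c, 0, ms, cg, mg)

def staticCountsContinousLeaveOut (dataList : List (List Int)) (number : Int) :
    Int × Int × Int :=
  let s := dataList.foldl (aStep number) (0, 0, 0, 0, 0)
  (s.1, s.2.2.1, s.2.2.2.2)

def staticLotteryNumber (dataList : List (List Int)) : List (String × List (String × Int)) :=
  (PySem.List.pyRange 1 13 1).foldl (fun d i =>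
    let r := staticCountsContinousLeaveOut dataList i
    d ++ [(PySem.Int.toStr i,
      [("countsNumber", r.1), ("maxContinous", r.2.1), ("maxLeaveNumber", r.2.2)])]) []

-- ===== PORT B =====
-- state: (prev, cur, best, maxg)
def bStep (s : Int × Int × Int × Int) (p : Int) : Int × Int × Int × Int :=
  let (prev, cur, best, maxg) := s
  let cur := if p == prev + 1 then cur + 1 else 1
  let best := if cur > best then cur else best
  let maxg := if p - prev - 1 > maxg then p - prev - 1 else maxg
  (p, cur, best, maxg)

def bPositions (dataList : List (List Int)) (number : Int) : List Int :=
  ((PySem.List.enumerate dataList).filter (fun pr => pr.2.contains number)).map (fun pr => pr.1)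

def staticLotteryNumber_alt (dataList : List (List Int)) : List (String × List (String × Int)) :=
  let n : Int := dataList.length
  (PySem.List.pyRange 1 13 1).foldl (fun d number =>
    let positions := bPositions dataList number
    let s := positions.foldl bStep (-1, 0, 0, 0)
    let maxg := if n - s.1 - 1 > s.2.2.2 then n - s.1 - 1 else s.2.2.2
    d ++ [(PySem.Int.toStr number,
      [("countsNumber", (positions.length : Int)), ("maxContinous", s.2.2.1),
       ("maxLeaveNumber", maxg)])]) []

-- ===== PRECONDITION & SPEC =====
def Spec_staticLotteryNumber (dataList : List (List Int)) (out : List (String × List (String × Int))) : Prop := out = staticLotteryNumber_alt dataList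
instance (dataList : List (List Int)) (out : List (String × List (String × Int))) : Decidable (Spec_staticLotteryNumber dataList out) := by unfold Spec_staticLotteryNumber; infer_instance

-- ===== CLAIM (what is proved, stated in full; the proofs are below) =====
def Claim_equal_staticLotteryNumber : Prop := ∀ (dataList : List (List Int)), Dom_staticLotteryNumber dataList → Spec_staticLotteryNumber dataList (staticLotteryNumber dataList)

-- ===== LEMMAS AND PROOFS =====

theorem enumerate_append_singleton (l : List (List Int)) (x : List Int) (s : Int) :
    PySem.List.enumerate (l ++ [x]) s = PySem.List.enumerate l s ++ [(s + l.length, x)] := by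
  induction l generalizing s with
  | nil => simp [PySem.List.enumerate_cons, PySem.List.enumerate_nil]
  | cons y ys ih =>
      simp [PySem.List.enumerate_cons, ih]
      omega

theorem bPositions_append (l : List (List Int)) (x : List Int) (number : Int) :
    bPositions (l ++ [x]) number =
      bPositions l number ++ (if number ∈ x then [(l.length : Int)] else []) := by
  unfold bPositions
  rw [enumerate_append_singleton]
  by_cases h : number ∈ x <;> simp [h]

-- the per-number invariant: relation between A's five-counter state and B's position fold
theorem key_invariant (number : Int) (l : List (List Int)) :
    (l.foldl (aStep number) (0, 0, 0, 0, 0)).1 = ((bPositions l number).length : Int) ∧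
    ((bPositions l number).foldl bStep (-1, 0, 0, 0)).1 =
      (l.length : Int) - (l.foldl (aStep number) (0, 0, 0, 0, 0)).2.2.2.1 - 1 ∧
    (l.foldl (aStep number) (0, 0, 0, 0, 0)).2.1 =
      (if (l.foldl (aStep number) (0, 0, 0, 0, 0)).2.2.2.1 = 0
        then ((bPositions l number).foldl bStep (-1, 0, 0, 0)).2.1 else 0) ∧
    (l.foldl (aStep number) (0, 0, 0, 0, 0)).2.2.1 =
      ((bPositions l number).foldl bStep (-1, 0, 0, 0)).2.2.1 ∧
    (l.foldl (aStep number) (0, 0, 0, 0, 0)).2.2.2.2 =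
      (if (l.foldl (aStep number) (0, 0, 0, 0, 0)).2.2.2.1 >
            ((bPositions l number).foldl bStep (-1, 0, 0, 0)).2.2.2
        then (l.foldl (aStep number) (0, 0, 0, 0, 0)).2.2.2.1
        else ((bPositions l number).foldl bStep (-1, 0, 0, 0)).2.2.2) ∧
    0 ≤ (l.foldl (aStep number) (0, 0, 0, 0, 0)).2.2.2.1 ∧
    0 ≤ ((bPositions l number).foldl bStep (-1, 0, 0, 0)).2.2.2 := by
  induction l using List.reverseRecOn with
  | nil => norm_num [bPositions, PySem.List.enumerate_nil]
  | append_singleton l x ih =>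
      obtain ⟨c, cs, ms, cg, mg, hA⟩ :
          ∃ c cs ms cg mg, l.foldl (aStep number) (0, 0, 0, 0, 0) = (c, cs, ms, cg, mg) :=
        ⟨_, _, _, _, _, rfl⟩
      obtain ⟨prev, cur, best, maxg, hB⟩ :
          ∃ p cu be mx, (bPositions l number).foldl bStep (-1, 0, 0, 0) = (p, cu, be, mx) :=
        ⟨_, _, _, _, rfl⟩
      rw [hA, hB] at ih
      obtain ⟨h1, h2, h3, h4, h5, h6, h7⟩ := ih
      dsimp only at h1 h2 h3 h4 h5 h6 h7
      rw [List.foldl_append, bPositions_append, hA]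
      by_cases hx : number ∈ x
      · have hx' : x.contains number = true := by simpa using hx
        rw [if_pos hx, List.foldl_append, hB]
        simp only [aStep, bStep, hx', if_true, List.foldl_cons, List.foldl_nil,
          List.length_append, List.length_cons, List.length_nil, beq_iff_eq]
        split_ifs at * <;>
          refine ⟨by omega, by omega, by omega, by omega, by omega, by omega, by omega⟩
      · have hx' : x.contains number = false := by simpa using hx
        rw [if_neg hx, List.append_nil, hB]
        simp only [aStep, hx', Bool.false_eq_true, if_false, List.length_append,
          List.length_cons, List.length_nil, List.foldl_cons, List.foldl_nil]
        split_ifs at * <;>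
          refine ⟨by omega, by omega, by omega, by omega, by omega, by omega, by omega⟩

theorem per_number (dataList : List (List Int)) (number : Int) :
    staticCountsContinousLeaveOut dataList number =
      (((bPositions dataList number).length : Int),
       ((bPositions dataList number).foldl bStep (-1, 0, 0, 0)).2.2.1,
       (if (dataList.length : Int) - ((bPositions dataList number).foldl bStep (-1, 0, 0, 0)).1 - 1 >
            ((bPositions dataList number).foldl bStep (-1, 0, 0, 0)).2.2.2
        then (dataList.length : Int) - ((bPositions dataList number).foldl bStep (-1, 0, 0, 0)).1 - 1
        else ((bPositions dataList number).foldl bStep (-1, 0, 0, 0)).2.2.2)) := by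
  obtain ⟨h1, h2, h3, h4, h5, h6, h7⟩ := key_invariant number dataList
  unfold staticCountsContinousLeaveOut
  refine Prod.ext h1 (Prod.ext h4 ?_)
  simp only
  rw [h5, h2]
  have e : (dataList.length : Int) - ((dataList.length : Int) -
      (dataList.foldl (aStep number) (0, 0, 0, 0, 0)).2.2.2.1 - 1) - 1 =
      (dataList.foldl (aStep number) (0, 0, 0, 0, 0)).2.2.2.1 := by ring
  rw [e]

-- ===== VERDICT (by name: the statement is the Claim_ definition above) =====
theorem staticLotteryNumber_spec : Claim_equal_staticLotteryNumber := by
  intro dataList _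
  unfold Spec_staticLotteryNumber staticLotteryNumber staticLotteryNumber_alt
  congr 1
  funext d i
  rw [per_number]
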